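-- pv_equiv track=rewrite | github.com/silko-oleksandr/home_work_1 | home_work.py | make_hashtag
-- ===== SOURCE A (Python) =====
-- import string
--
-- def make_hashtag(text):
--     for p in string.punctuation:
--         text = text.replace(p, ' ')
--     words = text.split()
--     capitalized = [word.capitalize() for word in words]
--     result = '#' + ''.join(capitalized)
--     if len(result) > 140:
--         result = result[:140]
--     return result
-- ===== SOURCE B (Python) =====
-- import string
--
-- # Single fused left-to-right scan: accumulate word characters, flush each word
-- # capitalized when a separator (punctuation or whitespace) is seen.
-- def make_hashtag(text):
--     seps = set(string.punctuation) | set(string.whitespace)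
--     parts = []
--     buf = []
--     for c in text:
--         if c in seps:
--             if buf:
--                 parts.append(''.join(buf).capitalize())
--                 buf = []
--         else:
--             buf.append(c)
--     if buf:
--         parts.append(''.join(buf).capitalize())
--     return ('#' + ''.join(parts))[:140]
-- ===== Notes on version B (the rewrite author's own statement) =====
-- stated objective: alternative
-- what changed: Replaces A's 33 whole-string replace passes plus split plus per-word capitalize with one fused left-to-right scan that buffers word characters and flushes each word capitalized at a separator; cost is similar since A's passes run in C.
import Mathlib
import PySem

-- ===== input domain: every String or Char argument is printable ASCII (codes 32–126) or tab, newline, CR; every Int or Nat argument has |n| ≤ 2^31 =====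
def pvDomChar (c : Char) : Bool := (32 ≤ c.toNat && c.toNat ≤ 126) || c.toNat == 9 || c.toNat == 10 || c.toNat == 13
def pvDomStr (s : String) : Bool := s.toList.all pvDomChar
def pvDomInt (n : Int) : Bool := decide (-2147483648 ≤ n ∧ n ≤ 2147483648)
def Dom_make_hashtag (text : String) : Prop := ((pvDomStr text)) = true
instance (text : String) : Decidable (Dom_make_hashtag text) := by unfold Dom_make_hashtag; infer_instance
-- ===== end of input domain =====

-- B fuses A's replace/split/capitalize passes into one buffered scan (alternative decomposition, similar cost).

-- string.punctuation
def pvPunct : List Char := "!\"#$%&'()*+,-./:;<=>?@[\\]^_`{|}~".toList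

-- str.capitalize — exact on the ASCII domain (first char uppercased, rest lowered)
def pvCapitalize (w : List Char) : List Char :=
  match w with
  | [] => []
  | c :: rest => PySem.Chars.upperChar c :: PySem.Chars.lower rest

-- ===== PORT A =====
def make_hashtag (text : String) : String :=
  let t := pvPunct.foldl (fun s p => PySem.Chars.replace s [p] [' ']) text.toList
  let words := PySem.Chars.split₀ t
  let capitalized := words.map pvCapitalize
  let result := '#' :: PySem.Chars.join [] capitalized
  if result.length > 140 then String.ofList (PySem.Chars.slice result none (some 140))
  else String.ofList result

-- ===== PORT B =====
-- string.punctuation ∪ string.whitespace (" \t\n\r\x0b\x0c")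
def pvSeps : List Char := pvPunct ++ [' ', '\t', '\n', '\r', Char.ofNat 11, Char.ofNat 12]

-- loop body of Source B: flush the buffer capitalized at a separator, else extend it
def pvStep (st : List (List Char) × List Char) (c : Char) : List (List Char) × List Char :=
  if c ∈ pvSeps then
    if st.2.isEmpty then st else (st.1 ++ [pvCapitalize st.2], [])
  else (st.1, st.2 ++ [c])

-- post-loop flush of Source B
def pvFinish (st : List (List Char) × List Char) : List (List Char) :=
  if st.2.isEmpty then st.1 else st.1 ++ [pvCapitalize st.2]

def make_hashtag_alt (text : String) : String :=
  let st := text.toList.foldl pvStep ([], [])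
  let parts := pvFinish st
  String.ofList (PySem.Chars.slice ('#' :: PySem.Chars.join [] parts) none (some 140))

-- ===== PRECONDITION & SPEC =====
def Spec_make_hashtag (text : String) (out : String) : Prop := out = make_hashtag_alt text
instance (text : String) (out : String) : Decidable (Spec_make_hashtag text out) := by unfold Spec_make_hashtag; infer_instance

-- ===== CLAIM (what is proved, stated in full; the proofs are below) =====
def Claim_equal_make_hashtag : Prop := ∀ (text : String), Dom_make_hashtag text → Spec_make_hashtag text (make_hashtag text)

-- ===== LEMMAS AND PROOFS =====

theorem pvCharEq (c d : Char) : (c = d) ↔ c.toNat = d.toNat := by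
  constructor
  · intro h; subst h; rfl
  · intro h; exact Char.ext (by exact UInt32.toNat_inj.mp h)

-- single-character replace is a map
theorem pvReplaceGo (a b : Char) :
    ∀ (s : List Char) (fuel : ℕ) (acc : List Char), s.length ≤ fuel →
      PySem.Chars.replace.go [a] [b] fuel s acc
        = acc.reverse ++ s.map (fun c => if c = a then b else c) := by
  intro s
  induction s with
  | nil =>
    intro fuel acc _
    cases fuel <;> simp [PySem.Chars.replace.go]
  | cons c t ih =>
    intro fuel acc h
    cases fuel with
    | zero => simp at h
    | succ n =>
      simp only [PySem.Chars.replace.go]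
      by_cases hc : c = a
      · subst hc
        rw [show [c].isPrefixOf (c :: t) = true by simp [List.isPrefixOf]]
        simp only [if_pos]
        simpa using ih n (b :: acc) (by simpa using h)
      · have : [a].isPrefixOf (c :: t) = false := by
          simp [List.isPrefixOf]
          exact fun h' => (hc h'.symm).elim
        rw [this]
        simp only [Bool.false_eq_true, if_false]
        rw [ih n (c :: acc) (by simpa using Nat.le_of_succ_le_succ h)]
        simp [hc]

theorem pvReplaceSingle (a b : Char) (s : List Char) :
    PySem.Chars.replace s [a] [b] = s.map (fun c => if c = a then b else c) := by
  simp only [PySem.Chars.replace, List.isEmpty_cons, Bool.false_eq_true, if_false]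
  simpa using pvReplaceGo a b s s.length [] (le_refl _)

-- the fold of single-char replaces over a list of punctuation chars is one map
theorem pvFoldReplace (ps : List Char) :
    ∀ (s : List Char),
      ps.foldl (fun s p => PySem.Chars.replace s [p] [' ']) s
        = s.map (fun c => if c ∈ ps then ' ' else c) := by
  induction ps with
  | nil => intro s; simp
  | cons p ps ih =>
    intro s
    simp only [List.foldl_cons]
    rw [ih, pvReplaceSingle, List.map_map]
    refine List.map_congr_left ?_
    intro c _
    by_cases hc : c = p
    · subst hc; simp
    · simp [hc]

-- on domain characters: the replaced character is whitespace iff the original is a separator,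
-- and non-separators are left unchanged
theorem pvSepChar (c : Char) (h : pvDomChar c = true) :
    (PySem.Chars.isspace (if c ∈ pvPunct then ' ' else c) = true ↔ c ∈ pvSeps)
    ∧ (c ∉ pvSeps → (if c ∈ pvPunct then ' ' else c) = c) := by
  have hdom : 32 ≤ c.toNat ∧ c.toNat ≤ 126 ∨ c.toNat = 9 ∨ c.toNat = 10 ∨ c.toNat = 13 := by
    have h' := h
    simp only [pvDomChar, Bool.or_eq_true, Bool.and_eq_true, decide_eq_true_eq,
      beq_iff_eq] at h'
    tauto
  by_cases hp : c ∈ pvPunct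
  · have hs : c ∈ pvSeps := by simp only [pvSeps, List.mem_append]; left; exact hp
    refine ⟨?_, fun hn => absurd hs hn⟩
    rw [if_pos hp]
    simp only [hs, iff_true]
    decide
  · have hseq : c ∈ pvSeps ↔ (c.toNat = 32 ∨ c.toNat = 9 ∨ c.toNat = 10 ∨ c.toNat = 13 ∨
        c.toNat = 11 ∨ c.toNat = 12) := by
      constructor
      · intro hm
        simp only [pvSeps, List.mem_append] at hm
        rcases hm with hm | hm
        · exact absurd hm hp
        · simp only [List.mem_cons, List.not_mem_nil, or_false] at hm
          rcases hm with h1|h1|h1|h1|h1|h1 <;> subst h1 <;> decide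
      · intro hm
        simp only [pvSeps, List.mem_append]
        right
        have h2 : c = ' ' ∨ c = '\t' ∨ c = '\n' ∨ c = '\r' ∨ c = Char.ofNat 11 ∨
            c = Char.ofNat 12 := by
          rcases hm with h1|h1|h1|h1|h1|h1
          · exact Or.inl ((pvCharEq c ' ').mpr (by rw [h1]; decide))
          · exact Or.inr (Or.inl ((pvCharEq c '\t').mpr (by rw [h1]; decide)))
          · exact Or.inr (Or.inr (Or.inl ((pvCharEq c '\n').mpr (by rw [h1]; decide))))
          · exact Or.inr (Or.inr (Or.inr (Or.inl ((pvCharEq c '\r').mpr (by rw [h1]; decide)))))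
          · exact Or.inr (Or.inr (Or.inr (Or.inr (Or.inl ((pvCharEq c (Char.ofNat 11)).mpr
              (by rw [h1]; decide))))))
          · exact Or.inr (Or.inr (Or.inr (Or.inr (Or.inr ((pvCharEq c (Char.ofNat 12)).mpr
              (by rw [h1]; decide))))))
        rcases h2 with h2|h2|h2|h2|h2|h2 <;> subst h2 <;> decide
    rw [if_neg hp]
    refine ⟨?_, fun _ => rfl⟩
    rw [hseq]
    simp only [PySem.Chars.isspace, Bool.or_eq_true, Bool.and_eq_true, decide_eq_true_eq]
    omega

-- main bridge: split₀'s accumulator recursion over the replaced text, capitalized afterwards,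
-- equals Source B's buffered scan with capitalization at flush time
theorem pvMain :
    ∀ (s cur : List Char) (acc : List (List Char)),
      (∀ c ∈ s, pvDomChar c = true) →
      (PySem.Chars.split₀.go (s.map (fun c => if c ∈ pvPunct then ' ' else c)) cur acc).map pvCapitalize
        = pvFinish (s.foldl pvStep (acc.reverse.map pvCapitalize, cur.reverse)) := by
  intro s
  induction s with
  | nil =>
    intro cur acc _
    simp only [List.map_nil, List.foldl_nil, PySem.Chars.split₀.go, pvFinish]
    by_cases hc : cur.isEmpty
    · simp [List.isEmpty_iff.mp hc]
    · have : cur.reverse.isEmpty = false := by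
        simp [List.isEmpty_iff] at *; exact hc
      simp [hc, this]
  | cons c t ih =>
    intro cur acc hdom
    have hc := pvSepChar c (hdom c (by simp))
    simp only [List.map_cons, List.foldl_cons, PySem.Chars.split₀.go]
    by_cases hs : c ∈ pvSeps
    · have hsp : PySem.Chars.isspace (if c ∈ pvPunct then ' ' else c) = true := hc.1.mpr hs
      rw [hsp]
      simp only [if_pos, pvStep, hs, if_pos]
      by_cases hcur : cur.isEmpty
      · have hc0 : cur = [] := List.isEmpty_iff.mp hcur
        subst hc0
        simpa using ih [] acc (fun x hx => hdom x (by simp [hx]))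
      · have h2 : cur.reverse.isEmpty = false := by
          simp [List.isEmpty_iff] at *; exact hcur
        simp only [hcur, Bool.false_eq_true, if_false, h2]
        rw [ih [] (cur.reverse :: acc) (fun x hx => hdom x (by simp [hx]))]
        simp
    · have hne : PySem.Chars.isspace (if c ∈ pvPunct then ' ' else c) = false := by
        cases hh : PySem.Chars.isspace (if c ∈ pvPunct then ' ' else c)
        · rfl
        · exact absurd (hc.1.mp hh) hs
      have heq : (if c ∈ pvPunct then ' ' else c) = c := hc.2 hs
      rw [heq] at hne
      rw [heq, hne]
      simp only [Bool.false_eq_true, if_false, pvStep, hs]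
      rw [ih (c :: cur) acc (fun x hx => hdom x (by simp [hx]))]
      simp

-- ===== VERDICT (by name: the statement is the Claim_ definition above) =====
theorem make_hashtag_spec : Claim_equal_make_hashtag := by
  intro text hdom
  unfold Spec_make_hashtag make_hashtag make_hashtag_alt
  have hall : ∀ c ∈ text.toList, pvDomChar c = true := by
    have := hdom
    simpa [Dom_make_hashtag, pvDomStr, List.all_eq_true] using this
  rw [pvFoldReplace]
  have hw := pvMain text.toList [] [] hall
  simp only [List.reverse_nil, List.map_nil] at hw
  simp only [PySem.Chars.split₀]
  rw [hw]
  have hslice : ∀ (xs : List Char),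
      PySem.Chars.slice xs none (some 140) = xs.take 140 := by
    intro xs
    simp [PySem.Chars.slice_eq_listSlice, PySem.List.slice_to]
  set res := '#' :: PySem.Chars.join [] (pvFinish (text.toList.foldl pvStep ([], [])))
  by_cases hlen : res.length > 140
  · simp [hlen]
  · simp only [hlen, if_false]
    rw [hslice, List.take_of_length_le (by omega)]
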